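-- pv_equiv track=rewrite | github.com/ShuvalovAnthony/ez_python | Maksim/ege/23/21907.py | f
-- ===== SOURCE A (Python) =====
-- def f(start, stop):
--     if start == stop:
--         return 1
--     elif start > stop or start == 8: # исключающий этап
--         return 0
--
--     moves = [
--         f(start + 1, stop),
--         f(start + 2, stop),
--         f(start*2, stop)
--     ]
--
--     return sum(moves)
-- ===== SOURCE B (Python) =====
-- def f(start, stop):
--     if start >= stop:
--         return 1 if start == stop else 0
--     ways = {stop: 1}
--     for i in range(stop - 1, start - 1, -1):
--         ways[i] = 0 if i == 8 else ways.get(i + 1, 0) + ways.get(i + 2, 0) + ways.get(i * 2, 0)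
--     return ways[start]
-- ===== Notes on version B (the rewrite author's own statement) =====
-- stated objective: alternative
-- what changed: Replaced A's ternary-branching recursion by a single downward dynamic-programming pass that fills a dict of move-counts from stop to start and reads off the answer.
-- outside the precondition, e.g. on f(0, 3): A raises RecursionError, B returns 4; on f(-2, 3): A raises RecursionError, B returns 11
import Mathlib
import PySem

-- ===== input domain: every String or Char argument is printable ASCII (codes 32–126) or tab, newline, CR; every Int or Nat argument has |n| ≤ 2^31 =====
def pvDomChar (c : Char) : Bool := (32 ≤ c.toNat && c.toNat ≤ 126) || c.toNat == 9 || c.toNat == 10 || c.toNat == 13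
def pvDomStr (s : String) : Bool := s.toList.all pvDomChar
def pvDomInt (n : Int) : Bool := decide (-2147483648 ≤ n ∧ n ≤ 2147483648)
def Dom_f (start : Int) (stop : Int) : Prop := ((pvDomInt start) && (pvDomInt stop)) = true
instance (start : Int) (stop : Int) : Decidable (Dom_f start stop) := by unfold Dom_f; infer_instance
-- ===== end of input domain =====

-- B replaces A's ternary-branching recursion by a single downward dynamic-programming pass over a
-- table of (state → count); exact same return value wherever the Python A terminates.

-- ===== PORT A =====
-- A's recursion, with a fuel guard that only makes the same computation total:
-- fuel (stop-start).toNat+1 is enough whenever the Python recursion terminates (1 ≤ start or stop ≤ start).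
def fA : Nat → Int → Int → Int
  | 0, _, _ => 0
  | fuel+1, start, stop =>
    if start = stop then 1
    else if stop < start ∨ start = 8 then 0
    else fA fuel (start + 1) stop + fA fuel (start + 2) stop + fA fuel (start * 2) stop

def f (start : Int) (stop : Int) : Int := fA ((stop - start).toNat + 1) start stop

-- ===== PORT B =====
-- one DP step: ways[i] = 0 if i == 8 else ways.get(i+1,0) + ways.get(i+2,0) + ways.get(i*2,0)
def fAltStep (d : PySem.Dict Int Int) (i : Int) : PySem.Dict Int Int :=
  d.insert i (if i = 8 then 0 else d.getD (i + 1) 0 + d.getD (i + 2) 0 + d.getD (i * 2) 0)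

-- the filled table: for i in range(stop-1, start-1, -1)
def fTbl (start stop : Int) : PySem.Dict Int Int :=
  (PySem.List.pyRange (stop - 1) (start - 1) (-1)).foldl fAltStep ((PySem.Dict.empty).insert stop 1)

def f_alt (start : Int) (stop : Int) : Int :=
  if stop ≤ start then (if start = stop then 1 else 0)
  -- ways[start]: the key 'start' is always inserted by the loop (the range reaches start),
  -- so the lookup never raises; getD is exact here.
  else (fTbl start stop).getD start 0

-- ===== PRECONDITION & SPEC =====
-- Pre_f excludes exactly the inputs where the Python A never returns: for start ≤ 0 with
-- start < stop the call f(start*2, stop) descends forever (RecursionError).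
def Pre_f (start : Int) (stop : Int) : Prop := 1 ≤ start ∨ stop ≤ start
instance (start : Int) (stop : Int) : Decidable (Pre_f start stop) := by unfold Pre_f; infer_instance
def pvWitness_f : Int × Int := (1, 9)

def Spec_f (start : Int) (stop : Int) (out : Int) : Prop := out = f_alt start stop
instance (start : Int) (stop : Int) (out : Int) : Decidable (Spec_f start stop out) := by unfold Spec_f; infer_instance

-- ===== CLAIM (what is proved, stated in full; the proofs are below) =====
def Claim_equal_f : Prop := ∀ (start : Int) (stop : Int), Dom_f start stop → Pre_f start stop → Spec_f start stop (f start stop)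

-- ===== LEMMAS AND PROOFS =====

-- A's recursion is fuel-independent once the fuel exceeds (stop - start).toNat, for 1 ≤ start.
lemma fA_fuel_irrel : ∀ (n f1 f2 : Nat) (s t : Int), 1 ≤ s → (t - s).toNat = n →
    n < f1 → n < f2 → fA f1 s t = fA f2 s t := by
  intro n
  induction n using Nat.strong_induction_on with
  | _ n ih =>
    intro f1 f2 s t hs hn h1 h2
    obtain ⟨a, rfl⟩ : ∃ a, f1 = a + 1 := ⟨f1 - 1, by omega⟩
    obtain ⟨b, rfl⟩ : ∃ b, f2 = b + 1 := ⟨f2 - 1, by omega⟩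
    simp only [fA]
    by_cases hst : s = t
    · simp [hst]
    · simp only [if_neg hst]
      by_cases hz : t < s ∨ s = 8
      · simp [hz]
      · simp only [if_neg hz]
        rw [not_or] at hz
        obtain ⟨hnlt, hn8⟩ := hz
        have hlt : s < t := by omega
        have e1 := ih ((t - (s + 1)).toNat) (by omega) a b (s + 1) t (by omega) rfl (by omega) (by omega)
        have e2 := ih ((t - (s + 2)).toNat) (by omega) a b (s + 2) t (by omega) rfl (by omega) (by omega)
        have hd : t - s * 2 ≤ t - s - 1 := by omega
        have e3 := ih ((t - s * 2).toNat) (by omega) a b (s * 2) t (by omega) rfl (by omega) (by omega)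
        rw [e1, e2, e3]

lemma f_eq_self (t : Int) : f t t = 1 := by simp [f, fA]

lemma f_eq_zero (s t : Int) (h : s ≠ t) (h2 : t < s ∨ s = 8) : f s t = 0 := by
  simp [f, fA, h, h2]

lemma f_unfold (s t : Int) (hs : 1 ≤ s) (hlt : s < t) (h8 : s ≠ 8) :
    f s t = f (s + 1) t + f (s + 2) t + f (s * 2) t := by
  have hst : s ≠ t := ne_of_lt hlt
  show fA ((t - s).toNat + 1) s t = _
  have hcond : ¬(t < s ∨ s = 8) := by rw [not_or]; exact ⟨not_lt.mpr (le_of_lt hlt), h8⟩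
  simp only [fA, if_neg hst, if_neg hcond]
  have hd : t - s * 2 ≤ t - s - 1 := by omega
  rw [fA_fuel_irrel ((t - (s + 1)).toNat) ((t - s).toNat) ((t - (s + 1)).toNat + 1) (s + 1) t
        (by omega) rfl (by omega) (by omega),
      fA_fuel_irrel ((t - (s + 2)).toNat) ((t - s).toNat) ((t - (s + 2)).toNat + 1) (s + 2) t
        (by omega) rfl (by omega) (by omega),
      fA_fuel_irrel ((t - s * 2).toNat) ((t - s).toNat) ((t - s * 2).toNat + 1) (s * 2) t
        (by omega) rfl (by omega) (by omega)]
  rfl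

-- peeling the last loop iteration: range(stop-1, start-1, -1) = range(stop-1, start, -1) + [start]
lemma fTbl_range_step (start stop : Int) (h : start < stop) :
    PySem.List.pyRange (stop - 1) (start - 1) (-1)
      = PySem.List.pyRange (stop - 1) start (-1) ++ [start] := by
  rw [PySem.List.pyRange_neg_one_eq_reverse, PySem.List.pyRange_neg_one_eq_reverse]
  have e1 : start - 1 + 1 = start := by ring
  have e2 : stop - 1 + 1 = stop := by ring
  rw [e1, e2, PySem.List.pyRange_one_cons h, List.reverse_cons]

lemma fTbl_step (start stop : Int) (h : start < stop) :
    fTbl start stop = fAltStep (fTbl (start + 1) stop) start := by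
  unfold fTbl
  rw [fTbl_range_step start stop h, List.foldl_append]
  norm_num

-- table invariant: after filling down to 'start', the table holds exactly A's values on
-- [start, stop] and no other keys.
lemma fTbl_inv : ∀ (n : Nat) (start stop : Int), 1 ≤ start → start ≤ stop →
    (stop - start).toNat = n →
    (∀ j, start ≤ j → (fTbl start stop).getD j 0 = f j stop) ∧
    (∀ j, j < start ∨ stop < j → (fTbl start stop).get? j = none) := by
  intro n
  induction n with
  | zero =>
    intro start stop hs hle hn
    have : start = stop := by omega
    subst this
    have htbl : fTbl start start = (PySem.Dict.empty).insert start 1 := by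
      unfold fTbl
      rw [PySem.List.pyRange_neg_one_eq_nil (by omega)]
      rfl
    rw [htbl]
    constructor
    · intro j hj
      by_cases hje : j = start
      · subst hje; rw [PySem.Dict.getD_insert_self, f_eq_self]
      · have hgt : start < j := lt_of_le_of_ne hj (Ne.symm hje)
        rw [PySem.Dict.getD_insert_of_ne _ _ _ hje, PySem.Dict.getD_empty,
          f_eq_zero j start hje (Or.inl hgt)]
    · intro j hj
      have hje : j ≠ start := by omega
      rw [PySem.Dict.get?_insert_of_ne _ _ hje, PySem.Dict.get?_empty]
  | succ n ih =>
    intro start stop hs hle hn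
    have hlt : start < stop := by omega
    obtain ⟨ih1, ih2⟩ := ih (start + 1) stop (by omega) (by omega) (by omega)
    rw [fTbl_step start stop hlt]
    set d := fTbl (start + 1) stop with hd
    have hv : (if start = 8 then 0 else d.getD (start + 1) 0 + d.getD (start + 2) 0
        + d.getD (start * 2) 0) = f start stop := by
      by_cases h8 : start = 8
      · rw [if_pos h8, h8, f_eq_zero 8 stop (by omega) (Or.inr rfl)]
      · rw [if_neg h8, ih1 (start + 1) (by omega), ih1 (start + 2) (by omega),
          ih1 (start * 2) (by omega), f_unfold start stop hs hlt h8]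
    constructor
    · intro j hj
      by_cases hje : j = start
      · subst hje
        show (d.insert j _).getD j 0 = f j stop
        rw [PySem.Dict.getD_insert_self, hv]
      · show (d.insert start _).getD j 0 = f j stop
        rw [PySem.Dict.getD_insert_of_ne _ _ _ hje]
        exact ih1 j (by omega)
    · intro j hj
      have hje : j ≠ start := by omega
      show (d.insert start _).get? j = none
      rw [PySem.Dict.get?_insert_of_ne _ _ hje]
      exact ih2 j (by omega)

-- ===== VERDICT (by name: the statement is the Claim_ definition above) =====
theorem f_spec : Claim_equal_f := by
  intro start stop _ hpre
  unfold Spec_f f_alt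
  by_cases hss : stop ≤ start
  · rw [if_pos hss]
    by_cases heq : start = stop
    · rw [if_pos heq, heq, f_eq_self]
    · rw [if_neg heq, f_eq_zero start stop heq (Or.inl (lt_of_le_of_ne hss (Ne.symm heq)))]
  · rw [if_neg hss]
    have hs : 1 ≤ start := by
      rcases hpre with h | h
      · exact h
      · exact absurd h hss
    exact ((fTbl_inv ((stop - start).toNat) start stop hs (by omega) rfl).1 start le_rfl).symm
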